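-- pv_equiv track=rewrite | github.com/ruriariaru2-netizen/spofes-streamlit-v2 | scheduler.py | _get_conflict_events
-- ===== SOURCE A (Python) =====
-- from typing import Dict, List, Tuple, Set, Optional
--
-- def _get_conflict_events(chosen: Dict[str, Tuple]) -> Tuple[bool, Set[str]]:
--     used_owner = {}
--     conflict_events = set()
--     for ev, (_, _, used) in chosen.items():
--         for r in used:
--             if r in used_owner and used_owner[r] != ev:
--                 conflict_events.add(ev)
--                 conflict_events.add(used_owner[r])
--             else:
--                 used_owner[r] = ev
--     return len(conflict_events) > 0, conflict_events
-- ===== SOURCE B (Python) =====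
-- def _get_conflict_events(chosen):
--     # Phase 1: index each resource by the first event that uses it.
--     first_user = {}
--     for ev, (_, _, used) in chosen.items():
--         for r in used:
--             first_user.setdefault(r, ev)
--     # Phase 2: any use of a resource by a non-first event is a conflict
--     # between that event and the resource's first user.
--     conflict_events = set(p for ev, (_, _, used) in chosen.items()
--                             for r in used
--                             if first_user[r] != ev
--                             for p in (ev, first_user[r]))
--     return len(conflict_events) > 0, conflict_events
-- ===== Notes on version B (the rewrite author's own statement) =====
-- stated objective: alternative
-- what changed: A detects conflicts in one incremental pass that grows an owner dict and the conflict set together; B first builds the complete resource-to-first-user index in one pass, then a second pass emits every (event, first user) conflicting pair and deduplicates them into the set.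
import Mathlib
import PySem

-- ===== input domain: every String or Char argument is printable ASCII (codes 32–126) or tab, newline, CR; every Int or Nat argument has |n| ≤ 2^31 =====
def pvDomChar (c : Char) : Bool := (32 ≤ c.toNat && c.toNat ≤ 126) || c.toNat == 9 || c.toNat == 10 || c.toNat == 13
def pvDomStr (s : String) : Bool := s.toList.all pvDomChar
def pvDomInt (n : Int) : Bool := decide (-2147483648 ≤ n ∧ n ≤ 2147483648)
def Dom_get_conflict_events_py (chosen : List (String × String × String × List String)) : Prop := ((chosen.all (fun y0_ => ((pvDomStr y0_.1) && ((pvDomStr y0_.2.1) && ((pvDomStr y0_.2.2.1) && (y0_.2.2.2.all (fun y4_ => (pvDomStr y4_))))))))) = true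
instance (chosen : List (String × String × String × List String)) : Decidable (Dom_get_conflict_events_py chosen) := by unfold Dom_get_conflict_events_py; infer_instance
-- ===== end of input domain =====

-- B replaces A's single-pass incremental owner/conflict loop by a two-phase shape —
-- build the complete first-user index, then emit all conflicting pairs and dedup —
-- objective: alternative decomposition (same asymptotic cost).

-- ===== PORT A =====
def get_conflict_events_py (chosen : List (String × String × String × List String)) : Bool × List String :=
  let st := chosen.foldl
    (fun (st : PySem.Dict String String × PySem.Set String) p =>
      p.2.2.2.foldl
        (fun st r =>
          match st.1.get? r with
          | some o =>
              if o ≠ p.1 then (st.1, PySem.Set.add (PySem.Set.add st.2 p.1) o)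
              else (st.1.insert r p.1, st.2)
          | none => (st.1.insert r p.1, st.2))
        st)
    (PySem.Dict.empty, PySem.Set.empty)
  (decide (st.2.length > 0), st.2)

-- ===== PORT B =====
def get_conflict_events_py_alt (chosen : List (String × String × String × List String)) : Bool × List String :=
  let fu := chosen.foldl
    (fun (d : PySem.Dict String String) p =>
      p.2.2.2.foldl (fun d r => d.setdefault r p.1) d)
    PySem.Dict.empty
  let pairs := chosen.flatMap
    (fun p => p.2.2.2.flatMap
      (fun r =>
        match fu.get? r with
        | some o => if o ≠ p.1 then [p.1, o] else []
        | none => []))  -- none is unreachable: phase 1 indexed every resource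
  let s := PySem.Set.ofList pairs
  (decide (s.length > 0), s)

-- ===== PRECONDITION & SPEC =====
def Spec_get_conflict_events_py (chosen : List (String × String × String × List String)) (out : Bool × List String) : Prop := out = get_conflict_events_py_alt chosen
instance (chosen : List (String × String × String × List String)) (out : Bool × List String) : Decidable (Spec_get_conflict_events_py chosen out) := by unfold Spec_get_conflict_events_py; infer_instance

-- ===== CLAIM (what is proved, stated in full; the proofs are below) =====
def Claim_equal_get_conflict_events_py : Prop := ∀ (chosen : List (String × String × String × List String)), Dom_get_conflict_events_py chosen → Spec_get_conflict_events_py chosen (get_conflict_events_py chosen)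

-- ===== LEMMAS AND PROOFS =====

-- the (event, resource) pairs in A's visiting order
def pvFlat (chosen : List (String × String × String × List String)) : List (String × String) :=
  chosen.flatMap (fun p => p.2.2.2.map (fun r => (p.1, r)))

-- B's phase-1 step and index, on the flattened pair list
def pvSd (d : PySem.Dict String String) (q : String × String) : PySem.Dict String String :=
  d.setdefault q.2 q.1

def pvFu (l : List (String × String)) : PySem.Dict String String :=
  l.foldl pvSd PySem.Dict.empty

-- A's loop body, on the flattened pair list
def pvAStep (st : PySem.Dict String String × PySem.Set String) (q : String × String) :
    PySem.Dict String String × PySem.Set String :=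
  match st.1.get? q.2 with
  | some o =>
      if o ≠ q.1 then (st.1, PySem.Set.add (PySem.Set.add st.2 q.1) o)
      else (st.1.insert q.2 q.1, st.2)
  | none => (st.1.insert q.2 q.1, st.2)

-- B's phase-2 emitter, on the flattened pair list
def pvPairF (fu : PySem.Dict String String) (q : String × String) : List String :=
  match fu.get? q.2 with
  | some o => if o ≠ q.1 then [q.1, o] else []
  | none => []

lemma pvSd_of_contains (d : PySem.Dict String String) (k v : String)
    (h : d.contains k = true) : d.setdefault k v = d := by
  simp [PySem.Dict.setdefault, h]

lemma pvSd_of_not_contains (d : PySem.Dict String String) (k v : String)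
    (h : d.contains k = false) : d.setdefault k v = d.insert k v := by
  simp [PySem.Dict.setdefault, PySem.Dict.insert, h]

-- once a resource has an owner in the phase-1 fold, it keeps it
lemma pvFu_foldl_mono (l : List (String × String)) :
    ∀ (d : PySem.Dict String String) (r o : String), d.get? r = some o →
      (l.foldl pvSd d).get? r = some o := by
  induction l with
  | nil => intro d r o h; simpa using h
  | cons q l ih =>
      intro d r o h
      simp only [List.foldl_cons]
      apply ih
      by_cases hc : d.contains q.2 = true
      · rw [pvSd, pvSd_of_contains _ _ _ hc]; exact h
      · rw [pvSd, pvSd_of_not_contains _ _ _ (by simpa using hc)]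
        rw [PySem.Dict.get?_insert]
        split
        · rename_i he
          subst he
          rw [PySem.Dict.contains_eq_isSome_get?, h] at hc
          simp at hc
        · exact h

lemma pvFu_append_mono (pre rest : List (String × String)) (r o : String)
    (h : (pvFu pre).get? r = some o) : (pvFu (pre ++ rest)).get? r = some o := by
  rw [pvFu, List.foldl_append]
  exact pvFu_foldl_mono rest _ r o h

-- a resource unseen in the prefix is owned, in the full index, by its first user
lemma pvFu_first (pre suf : List (String × String)) (ev r : String)
    (h : (pvFu pre).get? r = none) :
    (pvFu (pre ++ (ev, r) :: suf)).get? r = some ev := by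
  have : pre ++ (ev, r) :: suf = (pre ++ [(ev, r)]) ++ suf := by simp
  rw [this]
  apply pvFu_append_mono
  have hc : (pvFu pre).contains r = false := by
    rw [PySem.Dict.contains_eq_isSome_get?, h]; rfl
  rw [pvFu, List.foldl_append]
  show (pvSd (pvFu pre) (ev, r)).get? r = some ev
  rw [pvSd, pvSd_of_not_contains _ _ _ hc, PySem.Dict.get?_insert]
  simp

lemma pvOfList_append_two (xs : List String) (a b : String) :
    PySem.Set.ofList (xs ++ [a, b]) = PySem.Set.add (PySem.Set.add (PySem.Set.ofList xs) a) b := by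
  simp [PySem.Set.ofList_eq_foldl, List.foldl_append]

-- main invariant: A's loop over the remaining pairs lands on B's deduplicated emission
lemma pvLoop (full : List (String × String)) :
    ∀ (suf pre : List (String × String)) (d : PySem.Dict String String),
      full = pre ++ suf →
      (∀ x, d.get? x = (pvFu pre).get? x) →
      (suf.foldl pvAStep (d, PySem.Set.ofList (pre.flatMap (pvPairF (pvFu full))))).2
        = PySem.Set.ofList (full.flatMap (pvPairF (pvFu full))) := by
  intro suf
  induction suf with
  | nil =>
      intro pre d hfull _
      simp at hfull
      subst hfull
      rfl
  | cons q suf ih =>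
      intro pre d hfull hd
      obtain ⟨ev, r⟩ := q
      have hfull' : full = (pre ++ [(ev, r)]) ++ suf := by simpa using hfull
      simp only [List.foldl_cons]
      rcases h : (pvFu pre).get? r with _ | o
      · -- resource unseen so far: both sides record ev as its first user, no conflict emitted
        have hF : (pvFu full).get? r = some ev := hfull ▸ pvFu_first pre suf ev r h
        have hstep : pvAStep (d, PySem.Set.ofList (pre.flatMap (pvPairF (pvFu full)))) (ev, r)
            = (d.insert r ev, PySem.Set.ofList ((pre ++ [(ev, r)]).flatMap (pvPairF (pvFu full)))) := by
          rw [pvAStep]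
          rw [show d.get? r = none from (hd r).trans h]
          rw [List.flatMap_append]
          simp [pvPairF, hF]
        rw [hstep]
        apply ih (pre ++ [(ev, r)]) _ hfull'
        intro x
        have hc : (pvFu pre).contains r = false := by
          rw [PySem.Dict.contains_eq_isSome_get?, h]; rfl
        have : pvFu (pre ++ [(ev, r)]) = (pvFu pre).insert r ev := by
          rw [pvFu, List.foldl_append]
          show pvSd (pvFu pre) (ev, r) = _
          rw [pvSd, pvSd_of_not_contains _ _ _ hc]
        rw [this, PySem.Dict.get?_insert, PySem.Dict.get?_insert]
        split <;> simp [hd x]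
      · -- resource already owned by o
        have hF : (pvFu full).get? r = some o := by
          rw [hfull]; exact pvFu_append_mono pre _ r o h
        have hpre1 : pvFu (pre ++ [(ev, r)]) = pvFu pre := by
          rw [pvFu, List.foldl_append]
          show pvSd (pvFu pre) (ev, r) = _
          rw [pvSd, pvSd_of_contains]
          rw [PySem.Dict.contains_eq_isSome_get?, h]; rfl
        by_cases ho : o = ev
        · -- same event re-uses the resource: no conflict, A rewrites the same owner
          subst ho
          have hstep : pvAStep (d, PySem.Set.ofList (pre.flatMap (pvPairF (pvFu full)))) (o, r)
              = (d.insert r o, PySem.Set.ofList ((pre ++ [(o, r)]).flatMap (pvPairF (pvFu full)))) := by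
            rw [pvAStep]
            rw [show d.get? r = some o from (hd r).trans h]
            rw [List.flatMap_append]
            simp [pvPairF, hF]
          rw [hstep]
          apply ih (pre ++ [(o, r)]) _ hfull'
          intro x
          rw [hpre1, PySem.Dict.get?_insert]
          split
          · rename_i he; subst he; exact h.symm
          · exact hd x
        · -- genuine conflict: A adds ev then o; B emits [ev, o] here
          have hstep : pvAStep (d, PySem.Set.ofList (pre.flatMap (pvPairF (pvFu full)))) (ev, r)
              = (d, PySem.Set.ofList ((pre ++ [(ev, r)]).flatMap (pvPairF (pvFu full)))) := by
            rw [pvAStep]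
            rw [show d.get? r = some o from (hd r).trans h]
            rw [List.flatMap_append]
            simp only [pvPairF, hF, List.flatMap_cons, List.flatMap_nil, List.append_nil]
            rw [if_pos ho, if_pos ho, pvOfList_append_two]
          rw [hstep]
          apply ih (pre ++ [(ev, r)]) _ hfull'
          intro x
          rw [hpre1]; exact hd x

-- A's nested fold is the flat fold; B's nested pieces are the flat index and emission
lemma pvA_flat (chosen : List (String × String × String × List String)) :
    get_conflict_events_py chosen =
      (let st := (pvFlat chosen).foldl pvAStep (PySem.Dict.empty, PySem.Set.empty)
       (decide (st.2.length > 0), st.2)) := by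
  rw [get_conflict_events_py, pvFlat, List.foldl_flatMap]
  simp only [List.foldl_map]
  rfl

lemma pvB_flat (chosen : List (String × String × String × List String)) :
    get_conflict_events_py_alt chosen =
      (let s := PySem.Set.ofList ((pvFlat chosen).flatMap (pvPairF (pvFu (pvFlat chosen))))
       (decide (s.length > 0), s)) := by
  rw [get_conflict_events_py_alt]
  have hfu : (chosen.foldl
      (fun (d : PySem.Dict String String) p =>
        p.2.2.2.foldl (fun d r => d.setdefault r p.1) d) PySem.Dict.empty)
      = pvFu (pvFlat chosen) := by
    rw [pvFu, pvFlat, List.foldl_flatMap]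
    simp only [List.foldl_map]
    rfl
  rw [hfu]
  have hp : (chosen.flatMap
      (fun p => p.2.2.2.flatMap
        (fun r =>
          match (pvFu (pvFlat chosen)).get? r with
          | some o => if o ≠ p.1 then [p.1, o] else []
          | none => [])))
      = (pvFlat chosen).flatMap (pvPairF (pvFu (pvFlat chosen))) := by
    rw [pvFlat, List.flatMap_assoc]
    simp only [List.flatMap_map]
    rfl
  rw [hp]

-- ===== VERDICT (by name: the statement is the Claim_ definition above) =====
theorem get_conflict_events_py_spec : Claim_equal_get_conflict_events_py := by
  intro chosen _
  rw [Spec_get_conflict_events_py, pvA_flat, pvB_flat]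
  have h2 := pvLoop (pvFlat chosen) (pvFlat chosen) [] PySem.Dict.empty rfl (fun _ => rfl)
  simp only [List.flatMap_nil] at h2
  simp only []
  rw [show PySem.Set.ofList ([] : List String) = PySem.Set.empty from rfl] at h2
  rw [h2]
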